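-- pv_equiv track=rewrite | github.com/sripriyesha/gdrive-to-video-platform | modules/worksheet.py | get_last_empty_string_index
-- ===== SOURCE A (Python) =====
-- def get_last_empty_string_index(list_of_strings, filter_string_func=True):
--     try:
--         last_empty_string_index = 0
--
--         index = 1
--         for s in list_of_strings:
--             if len(s) == 0:
--                 last_empty_string_index = index
--             index += 1
--
--         return last_empty_string_index
--         # return next(s for s in list_of_strings if s and filter_string_func(s))
--     except StopIteration:
--         return False
-- ===== SOURCE B (Python) =====
-- def get_last_empty_string_index(list_of_strings, filter_string_func=True):
--     items = list(list_of_strings)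
--     n = len(items)
--     for i, s in enumerate(reversed(items)):
--         if len(s) == 0:
--             return n - i
--     return 0
-- ===== Notes on version B (the rewrite author's own statement) =====
-- stated objective: idiomatic
-- what changed: B scans the list from the end and returns on the first empty string found (1-based index), instead of A's forward pass that tracks the last empty index with a counter.
import Mathlib
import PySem

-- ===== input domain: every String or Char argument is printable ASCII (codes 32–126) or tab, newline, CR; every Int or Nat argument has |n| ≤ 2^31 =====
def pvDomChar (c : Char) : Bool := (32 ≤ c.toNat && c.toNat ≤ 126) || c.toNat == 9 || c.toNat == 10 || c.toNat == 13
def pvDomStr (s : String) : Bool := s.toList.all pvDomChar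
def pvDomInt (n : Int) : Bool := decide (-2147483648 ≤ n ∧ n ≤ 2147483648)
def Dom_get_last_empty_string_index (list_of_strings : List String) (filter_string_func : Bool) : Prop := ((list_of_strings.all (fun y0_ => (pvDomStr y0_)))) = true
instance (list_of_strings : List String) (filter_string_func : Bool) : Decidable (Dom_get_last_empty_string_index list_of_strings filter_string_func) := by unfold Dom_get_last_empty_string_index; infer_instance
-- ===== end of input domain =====

-- B scans from the end and returns at the first empty string; A scans forward tracking the last empty index.

-- ===== PORT A =====
-- forward loop: state (last_empty_string_index, index), index starts at 1
def get_last_empty_string_index (list_of_strings : List String) (filter_string_func : Bool) : Int :=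
  (list_of_strings.foldl
    (fun (st : Int × Int) s =>
      ((if PySem.Str.len s = 0 then st.2 else st.1), st.2 + 1))
    (0, 1)).1

-- ===== PORT B =====
-- `for i, s in enumerate(reversed(items)): if len(s) == 0: return n - i` / `return 0`
def pvAltGo (n : Int) : List String → Int → Int
  | [], _ => 0
  | s :: rest, i => if PySem.Str.len s = 0 then n - i else pvAltGo n rest (i + 1)

def get_last_empty_string_index_alt (list_of_strings : List String) (filter_string_func : Bool) : Int :=
  pvAltGo (list_of_strings.length : Int) list_of_strings.reverse 0

-- ===== PRECONDITION & SPEC =====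
def Spec_get_last_empty_string_index (list_of_strings : List String) (filter_string_func : Bool) (out : Int) : Prop := out = get_last_empty_string_index_alt list_of_strings filter_string_func
instance (list_of_strings : List String) (filter_string_func : Bool) (out : Int) : Decidable (Spec_get_last_empty_string_index list_of_strings filter_string_func out) := by unfold Spec_get_last_empty_string_index; infer_instance

-- ===== CLAIM (what is proved, stated in full; the proofs are below) =====
def Claim_equal_get_last_empty_string_index : Prop := ∀ (list_of_strings : List String) (filter_string_func : Bool), Dom_get_last_empty_string_index list_of_strings filter_string_func → Spec_get_last_empty_string_index list_of_strings filter_string_func (get_last_empty_string_index list_of_strings filter_string_func)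

-- ===== LEMMAS AND PROOFS =====

-- 0-based index of the LAST empty string in a list, if any
def pvLastEmpty : List String → Option Nat
  | [] => none
  | s :: t =>
    match pvLastEmpty t with
    | some j => some (j + 1)
    | none => if PySem.Str.len s = 0 then some 0 else none

theorem pvFoldlA (xs : List String) (acc k : Int) :
    (xs.foldl (fun (st : Int × Int) s =>
        ((if PySem.Str.len s = 0 then st.2 else st.1), st.2 + 1)) (acc, k)).1
      = match pvLastEmpty xs with
        | some j => k + (j : Int)
        | none => acc := by
  induction xs generalizing acc k with
  | nil => simp [pvLastEmpty]
  | cons x t ih =>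
    simp only [List.foldl_cons, pvLastEmpty]
    rw [ih]
    cases h : pvLastEmpty t with
    | none =>
      by_cases hx : PySem.Str.len x = 0
      · rw [if_pos hx, if_pos hx]; simp
      · rw [if_neg hx, if_neg hx]
    | some j =>
      push_cast
      ring

theorem pvLastEmpty_snoc (t : List String) (a : String) :
    pvLastEmpty (t ++ [a])
      = if PySem.Str.len a = 0 then some t.length else pvLastEmpty t := by
  induction t with
  | nil =>
    by_cases hx : PySem.Str.len a = 0
    · rw [if_pos hx]; simp only [List.nil_append, pvLastEmpty]; rw [if_pos hx]; rfl
    · rw [if_neg hx]; simp only [List.nil_append, pvLastEmpty]; rw [if_neg hx]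
  | cons x t ih =>
    simp only [List.cons_append, pvLastEmpty, ih, List.length_cons]
    by_cases hx : PySem.Str.len a = 0
    · rw [if_pos hx, if_pos hx]
    · rw [if_neg hx, if_neg hx]

theorem pvAltGoEq (xs : List String) (n i : Int) :
    pvAltGo n xs.reverse i
      = match pvLastEmpty xs with
        | some j => n - i - ((xs.length : Int) - 1 - (j : Int))
        | none => 0 := by
  induction xs using List.reverseRecOn generalizing i with
  | nil => simp [pvAltGo, pvLastEmpty]
  | append_singleton t a ih =>
    rw [List.reverse_append, pvLastEmpty_snoc]
    simp only [List.reverse_singleton, List.singleton_append, pvAltGo,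
      List.length_append, List.length_singleton]
    by_cases hx : PySem.Str.len a = 0
    · rw [if_pos hx, if_pos hx]
      simp only []
      push_cast
      ring
    · rw [if_neg hx, if_neg hx, ih]
      cases h : pvLastEmpty t with
      | none => rfl
      | some j =>
        simp only []
        push_cast
        ring

-- ===== VERDICT (by name: the statement is the Claim_ definition above) =====
theorem get_last_empty_string_index_spec : Claim_equal_get_last_empty_string_index := by
  intro xs _ _
  unfold Spec_get_last_empty_string_index get_last_empty_string_index get_last_empty_string_index_alt
  rw [pvFoldlA, pvAltGoEq]
  cases h : pvLastEmpty xs with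
  | none => rfl
  | some j =>
    simp only []
    ring
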